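-- pv_equiv track=rewrite | github.com/thierryxdp/TCC | problems/842/solution_198498.py | pontos_por_time
-- ===== SOURCE A (Python) =====
-- def pontos_por_time(lista):
--     pontos = dict()
--     for elemento in lista:
--         if elemento[0] not in pontos.keys():
--             pontos[elemento[0]] = 0
--         if elemento[1] not in pontos.keys():
--             pontos[elemento[1]] = 0
--
--         if elemento[2][0] > elemento[2][1]:
--             pontos[elemento[0]] += 3
--         elif elemento[2][0] < elemento[2][1]:
--             pontos[elemento[1]] += 3
--         else:
--             pontos[elemento[0]] += 1
--             pontos[elemento[1]] += 1
--     return pontos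
-- ===== SOURCE B (Python) =====
-- def pontos_por_time(lista):
--     # Flatten each match into (team, points) events, then aggregate generically.
--     eventos = []
--     for e in lista:
--         eventos.append((e[0], 0))
--         eventos.append((e[1], 0))
--         if e[2][0] > e[2][1]:
--             eventos.append((e[0], 3))
--         elif e[2][0] < e[2][1]:
--             eventos.append((e[1], 3))
--         else:
--             eventos.append((e[0], 1))
--             eventos.append((e[1], 1))
--     pontos = {}
--     for t, p in eventos:
--         pontos[t] = pontos.get(t, 0) + p
--     return pontos
-- ===== Notes on version B (the rewrite author's own statement) =====
-- stated objective: alternative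
-- what changed: Instead of A's single interleaved pass with membership-guarded zero-inserts and in-place += updates, B flattens each match into (team, points) events (zero registration events plus win/tie scoring events) and then folds one generic dict.get accumulator over the event list.
import Mathlib
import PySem

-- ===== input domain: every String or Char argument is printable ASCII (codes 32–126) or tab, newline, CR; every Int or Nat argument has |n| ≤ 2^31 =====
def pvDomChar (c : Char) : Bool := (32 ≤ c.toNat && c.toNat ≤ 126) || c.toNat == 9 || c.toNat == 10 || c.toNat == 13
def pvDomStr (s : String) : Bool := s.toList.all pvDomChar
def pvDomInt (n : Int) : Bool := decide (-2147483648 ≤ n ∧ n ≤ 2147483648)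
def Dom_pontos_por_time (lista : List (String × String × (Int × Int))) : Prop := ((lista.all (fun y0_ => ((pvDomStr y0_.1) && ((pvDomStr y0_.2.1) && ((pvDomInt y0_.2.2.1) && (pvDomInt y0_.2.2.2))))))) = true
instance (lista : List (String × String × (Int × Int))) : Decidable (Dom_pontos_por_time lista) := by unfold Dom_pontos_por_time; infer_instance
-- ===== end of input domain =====

-- B replaces A's single interleaved pass (membership-guarded zero-inserts + in-place updates)
-- by flattening each match into (team, points) events and folding one generic accumulator
-- over the event list (objective: alternative decomposition, same asymptotic cost).


-- ===== PORT A =====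
-- one iteration of A's loop: conditional zero-inserts, then the scoring branch
-- (`pontos[k] += v`, with k present at that point, is ported as Dict.modify k 0 (· + v))
def stepA (pontos : PySem.Dict String Int) (e : String × String × (Int × Int)) : PySem.Dict String Int :=
  let pontos := if pontos.contains e.1 then pontos else pontos.insert e.1 0
  let pontos := if pontos.contains e.2.1 then pontos else pontos.insert e.2.1 0
  if e.2.2.1 > e.2.2.2 then pontos.modify e.1 0 (· + 3)
  else if e.2.2.1 < e.2.2.2 then pontos.modify e.2.1 0 (· + 3)
  else (pontos.modify e.1 0 (· + 1)).modify e.2.1 0 (· + 1)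

def pontos_por_time (lista : List (String × String × (Int × Int))) : List (String × Int) :=
  (lista.foldl stepA PySem.Dict.empty).items

-- ===== PORT B =====
-- the events one match appends to `eventos` in B's first loop
def eventosOf (e : String × String × (Int × Int)) : List (String × Int) :=
  [(e.1, 0), (e.2.1, 0)] ++
    (if e.2.2.1 > e.2.2.2 then [(e.1, 3)]
     else if e.2.2.1 < e.2.2.2 then [(e.2.1, 3)]
     else [(e.1, 1), (e.2.1, 1)])

-- one iteration of B's second loop: pontos[t] = pontos.get(t, 0) + p
def aggStep (pontos : PySem.Dict String Int) (tp : String × Int) : PySem.Dict String Int :=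
  pontos.insert tp.1 (pontos.getD tp.1 0 + tp.2)

def pontos_por_time_alt (lista : List (String × String × (Int × Int))) : List (String × Int) :=
  let eventos := lista.foldl (fun acc e => acc ++ eventosOf e) []
  (eventos.foldl aggStep PySem.Dict.empty).items

-- ===== PRECONDITION & SPEC =====
def Spec_pontos_por_time (lista : List (String × String × (Int × Int))) (out : List (String × Int)) : Prop := out = pontos_por_time_alt lista
instance (lista : List (String × String × (Int × Int))) (out : List (String × Int)) : Decidable (Spec_pontos_por_time lista out) := by unfold Spec_pontos_por_time; infer_instance

-- ===== CLAIM (what is proved, stated in full; the proofs are below) =====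
def Claim_equal_pontos_por_time : Prop := ∀ (lista : List (String × String × (Int × Int))), Dom_pontos_por_time lista → Spec_pontos_por_time lista (pontos_por_time lista)

-- ===== LEMMAS AND PROOFS =====

-- the two teams of a match, in A's inspection order
def teams (l : List (String × String × (Int × Int))) : List String :=
  l.flatMap (fun e => [e.1, e.2.1])

-- the points a single match contributes to team k
def contrib (e : String × String × (Int × Int)) (k : String) : Int :=
  if e.2.2.1 > e.2.2.2 then (if k = e.1 then 3 else 0)
  else if e.2.2.1 < e.2.2.2 then (if k = e.2.1 then 3 else 0)
  else (if k = e.1 then 1 else 0) + (if k = e.2.1 then 1 else 0)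

def pts (l : List (String × String × (Int × Int))) (k : String) : Int :=
  (l.map (fun e => contrib e k)).sum

def evsum (ev : List (String × Int)) (k : String) : Int :=
  (ev.map (fun p => if k = p.1 then p.2 else 0)).sum

theorem keys_insert_add (d : PySem.Dict String Int) (k : String) (v : Int) :
    (d.insert k v).keys = PySem.Set.add d.keys k := by
  by_cases h : d.contains k = true
  · rw [PySem.Dict.keys_insert_of_contains d v h,
      PySem.Set.add_of_mem ((PySem.Dict.contains_iff_mem_keys d k).mp h)]
  · have h' : d.contains k = false := by simpa using h
    rw [PySem.Dict.keys_insert_of_not_contains d v h',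
      PySem.Set.add_of_not_mem (fun hm => h ((PySem.Dict.contains_iff_mem_keys d k).mpr hm))]

theorem keys_condInsert (d : PySem.Dict String Int) (k : String) :
    (if d.contains k then d else d.insert k 0).keys = PySem.Set.add d.keys k := by
  split_ifs with h
  · rw [PySem.Set.add_of_mem ((PySem.Dict.contains_iff_mem_keys d k).mp h)]
  · exact keys_insert_add d k 0

theorem keys_modify_mem (d : PySem.Dict String Int) (k : String) (f : Int → Int)
    (h : k ∈ d.keys) : (d.modify k 0 f).keys = d.keys := by
  rw [PySem.Dict.keys_modify, keys_insert_add, PySem.Set.add_of_mem h]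

theorem keys_stepA (d : PySem.Dict String Int) (e : String × String × (Int × Int)) :
    (stepA d e).keys = PySem.Set.add (PySem.Set.add d.keys e.1) e.2.1 := by
  unfold stepA
  have h1 := keys_condInsert d e.1
  set d1 := if d.contains e.1 then d else d.insert e.1 0 with hd1
  have h2 := keys_condInsert d1 e.2.1
  set d2 := if d1.contains e.2.1 then d1 else d1.insert e.2.1 0 with hd2
  have hk2 : d2.keys = PySem.Set.add (PySem.Set.add d.keys e.1) e.2.1 := by rw [h2, h1]
  have hm1 : e.1 ∈ d2.keys := by
    rw [hk2]; exact (PySem.Set.mem_add _ _ _).mpr (Or.inl ((PySem.Set.mem_add _ _ _).mpr (Or.inr rfl)))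
  have hm2 : e.2.1 ∈ d2.keys := by
    rw [hk2]; exact (PySem.Set.mem_add _ _ _).mpr (Or.inr rfl)
  split_ifs with hgt hlt
  · rw [keys_modify_mem _ _ _ hm1, hk2]
  · rw [keys_modify_mem _ _ _ hm2, hk2]
  · rw [keys_modify_mem, keys_modify_mem _ _ _ hm1, hk2]
    rw [keys_modify_mem _ _ _ hm1]; exact hm2

theorem getD_condInsert (d : PySem.Dict String Int) (j k : String) :
    (if d.contains j then d else d.insert j 0).getD k 0 = d.getD k 0 := by
  split_ifs with h
  · rfl
  · rw [PySem.Dict.getD_insert]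
    split_ifs with hk
    · subst hk; rw [PySem.Dict.getD_of_not_contains d 0 (by simpa using h)]
    · rfl

theorem getD_stepA (d : PySem.Dict String Int) (e : String × String × (Int × Int)) (k : String) :
    (stepA d e).getD k 0 = d.getD k 0 + contrib e k := by
  unfold stepA contrib
  set d1 := if d.contains e.1 then d else d.insert e.1 0 with hd1
  set d2 := if d1.contains e.2.1 then d1 else d1.insert e.2.1 0 with hd2
  have hg : ∀ j, d2.getD j 0 = d.getD j 0 := by
    intro j; rw [hd2, getD_condInsert, hd1, getD_condInsert]
  rcases eq_or_ne e.1 e.2.1 with h0 | h0 <;>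
    rcases eq_or_ne k e.1 with h1 | h1 <;>
      rcases eq_or_ne k e.2.1 with h2 | h2 <;>
        split_ifs with hgt hlt <;>
          simp [PySem.Dict.getD_modify, getD_condInsert, hd1, h0, h1, h2] <;>
            first
              | omega
              | simp_all

theorem keys_foldA (l : List (String × String × (Int × Int))) (d : PySem.Dict String Int) :
    (l.foldl stepA d).keys = PySem.Set.update d.keys (teams l) := by
  induction l generalizing d with
  | nil => simp [teams]
  | cons x l ih =>
      simp only [List.foldl_cons, ih, teams, List.flatMap_cons]
      rw [PySem.Set.update_append]
      simp [PySem.Set.update_cons, keys_stepA]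

theorem getD_foldA (l : List (String × String × (Int × Int))) (d : PySem.Dict String Int) (k : String) :
    (l.foldl stepA d).getD k 0 = d.getD k 0 + pts l k := by
  induction l generalizing d with
  | nil => simp [pts]
  | cons x l ih => simp [ih, getD_stepA, pts, add_assoc]

theorem keys_foldAgg (ev : List (String × Int)) (d : PySem.Dict String Int) :
    (ev.foldl aggStep d).keys = PySem.Set.update d.keys (ev.map (·.1)) := by
  exact PySem.Dict.keys_foldl_insert_key ev (·.1) (fun d x => d.getD x.1 0 + x.2) d

theorem getD_foldAgg (ev : List (String × Int)) (d : PySem.Dict String Int) (k : String) :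
    (ev.foldl aggStep d).getD k 0 = d.getD k 0 + evsum ev k := by
  induction ev generalizing d with
  | nil => simp [evsum]
  | cons x ev ih =>
      simp only [List.foldl_cons, ih, aggStep, evsum, List.map_cons, List.sum_cons]
      rw [PySem.Dict.getD_insert]
      split_ifs with h <;> simp [h, add_assoc, add_comm, add_left_comm]

theorem update_eventosOf (s : PySem.Set String) (e : String × String × (Int × Int)) :
    PySem.Set.update s ((eventosOf e).map (·.1)) = PySem.Set.add (PySem.Set.add s e.1) e.2.1 := by
  unfold eventosOf
  split_ifs with hgt hlt <;>
    simp [PySem.Set.update_cons, PySem.Set.update_nil,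
      PySem.Set.add_of_mem, PySem.Set.mem_add]

theorem evsum_eventosOf (e : String × String × (Int × Int)) (k : String) :
    evsum (eventosOf e) k = contrib e k := by
  unfold eventosOf contrib evsum
  split_ifs with hgt hlt <;> simp <;> (try split_ifs) <;> first | assumption | omega

theorem evsum_append (a b : List (String × Int)) (k : String) :
    evsum (a ++ b) k = evsum a k + evsum b k := by
  simp [evsum]

theorem keys_eventos (l : List (String × String × (Int × Int))) (s : PySem.Set String) :
    PySem.Set.update s ((l.flatMap eventosOf).map (·.1)) = PySem.Set.update s (teams l) := by
  induction l generalizing s with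
  | nil => simp [teams]
  | cons x l ih =>
      simp only [List.flatMap_cons, List.map_append, teams]
      rw [PySem.Set.update_append, update_eventosOf, PySem.Set.update_append]
      simpa [teams, PySem.Set.update_cons] using ih (PySem.Set.add (PySem.Set.add s x.1) x.2.1)

theorem evsum_eventos (l : List (String × String × (Int × Int))) (k : String) :
    evsum (l.flatMap eventosOf) k = pts l k := by
  induction l with
  | nil => simp [evsum, pts]
  | cons x l ih =>
      rw [List.flatMap_cons, evsum_append, evsum_eventosOf, ih]
      simp [pts]

theorem pontos_por_time_spec' (lista : List (String × String × (Int × Int))) :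
    pontos_por_time lista = pontos_por_time_alt lista := by
  simp only [pontos_por_time, pontos_por_time_alt, PySem.List.foldl_append_eq_flatMap,
    List.nil_append]
  have ndA : (lista.foldl stepA PySem.Dict.empty).keys.Nodup := by
    rw [keys_foldA]
    exact PySem.Set.nodup_update _ _ (by simp [PySem.Dict.keys_empty])
  have ndB : ((lista.flatMap eventosOf).foldl aggStep PySem.Dict.empty).keys.Nodup := by
    rw [keys_foldAgg]
    exact PySem.Set.nodup_update _ _ (by simp [PySem.Dict.keys_empty])
  rw [PySem.Dict.items_eq_map_keys _ ndA 0, PySem.Dict.items_eq_map_keys _ ndB 0,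
    keys_foldA, keys_foldAgg, PySem.Dict.keys_empty, keys_eventos]
  apply List.map_congr_left
  intro k _
  rw [getD_foldA, getD_foldAgg, evsum_eventos]

-- ===== VERDICT (by name: the statement is the Claim_ definition above) =====
theorem pontos_por_time_spec : Claim_equal_pontos_por_time := by
  intro lista _
  exact pontos_por_time_spec' lista
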